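-- pv_equiv track=rewrite | github.com/bartvoet/acoustic_measurement | load_sound.py | transform_to_db
-- ===== SOURCE A (Python) =====
-- transformation_list = [28000,29600,29800,30000,30200,30500,30900,31100,31300,31500,32000,35000,39000,42000,45000,
--             49000,53000,57000,61000,68000,73000,82000,90000,100000,111000,125000,140000,155000,168000,180000,200000,230000,
--             260000,300000,340000,380000,420000,460000,500000,550000,600000,680000,760000,840000,940000,
--             1150000,1350000,1500000,1650000,1850000,2100000,2400000,2700000,3000000,3300000,3600000,3900000]
--
-- start_with_db = 40
--
-- MIN = -1
--
-- MAX = -2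
--
-- def db_is_low(raw_value):
--     return raw_value < transformation_list[0]
--
-- def db_is_high(raw_value):
--     return raw_value > transformation_list[-1]
--
-- def transform_to_db(raw_value):
--     if db_is_low(raw_value):
--         return MIN
--     if db_is_high(raw_value):
--         return MAX
--
--     for idx, val in enumerate(transformation_list):
--         if(raw_value < val):
--             return start_with_db + idx -1;
--     return MIN
-- ===== SOURCE B (Python) =====
-- transformation_list = [28000,29600,29800,30000,30200,30500,30900,31100,31300,31500,32000,35000,39000,42000,45000,
--             49000,53000,57000,61000,68000,73000,82000,90000,100000,111000,125000,140000,155000,168000,180000,200000,230000,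
--             260000,300000,340000,380000,420000,460000,500000,550000,600000,680000,760000,840000,940000,
--             1150000,1350000,1500000,1650000,1850000,2100000,2400000,2700000,3000000,3300000,3600000,3900000]
--
-- start_with_db = 40
--
-- MIN = -1
--
-- MAX = -2
--
-- def transform_to_db(raw_value):
--     if raw_value < transformation_list[0]:
--         return MIN
--     if raw_value > transformation_list[-1]:
--         return MAX
--     # binary search: lo = index of first threshold strictly greater than raw_value
--     lo, hi = 0, len(transformation_list)
--     while lo < hi:
--         mid = (lo + hi) // 2
--         if raw_value < transformation_list[mid]:
--             hi = mid
--         else: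
--             lo = mid + 1
--     if lo == len(transformation_list):
--         return MIN
--     return start_with_db + lo - 1
-- ===== Notes on version B (the rewrite author's own statement) =====
-- stated objective: faster
-- what changed: Replaces A's linear enumerate scan over the threshold table with a binary search (bisect_right-style lo/hi loop), keeping the boundary guards and the fall-through MIN when raw_value equals the last threshold.
import Mathlib
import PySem

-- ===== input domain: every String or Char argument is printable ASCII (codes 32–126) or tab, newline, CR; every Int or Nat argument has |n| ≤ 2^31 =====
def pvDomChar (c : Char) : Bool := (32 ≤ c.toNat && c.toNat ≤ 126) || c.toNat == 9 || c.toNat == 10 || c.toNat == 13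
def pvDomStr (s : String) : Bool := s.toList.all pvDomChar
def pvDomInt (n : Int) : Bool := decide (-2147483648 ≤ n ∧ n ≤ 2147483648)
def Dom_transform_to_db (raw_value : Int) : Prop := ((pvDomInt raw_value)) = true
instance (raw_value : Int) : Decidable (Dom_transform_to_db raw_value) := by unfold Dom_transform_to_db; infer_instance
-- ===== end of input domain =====

-- B replaces A's linear scan over the sorted threshold table with a binary search (same outputs, fewer comparisons).


-- module-level constant shared by both programs
def transformationList : List Int := [28000,29600,29800,30000,30200,30500,30900,31100,31300,31500,32000,35000,39000,42000,45000,
            49000,53000,57000,61000,68000,73000,82000,90000,100000,111000,125000,140000,155000,168000,180000,200000,230000,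
            260000,300000,340000,380000,420000,460000,500000,550000,600000,680000,760000,840000,940000,
            1150000,1350000,1500000,1650000,1850000,2100000,2400000,2700000,3000000,3300000,3600000,3900000]

-- ===== PORT A =====
-- the `for idx, val in enumerate(...)` loop with early return
def aLoop (raw : Int) (idx : Nat) : List Int → Int
  | [] => -1
  | v :: rest => if raw < v then 40 + (idx : Int) - 1 else aLoop raw (idx + 1) rest

def transform_to_db (raw_value : Int) : Int :=
  if raw_value < (PySem.List.pyGet? transformationList 0).getD 0 then -1
  else if raw_value > (PySem.List.pyGet? transformationList (-1)).getD 0 then -2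
  else aLoop raw_value 0 transformationList

-- ===== PORT B =====
-- the `while lo < hi` binary-search loop; fuel only makes it total (never exhausted since hi-lo shrinks)
def bsr (raw : Int) : Nat → Nat → Nat → Nat
  | 0, lo, _ => lo
  | fuel + 1, lo, hi =>
    if lo < hi then
      let mid := (lo + hi) / 2
      if raw < transformationList.getD mid 0 then bsr raw fuel lo mid
      else bsr raw fuel (mid + 1) hi
    else lo

def transform_to_db_alt (raw_value : Int) : Int :=
  if raw_value < (PySem.List.pyGet? transformationList 0).getD 0 then -1
  else if raw_value > (PySem.List.pyGet? transformationList (-1)).getD 0 then -2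
  else
    let lo := bsr raw_value transformationList.length 0 transformationList.length
    if lo = transformationList.length then -1 else 40 + (lo : Int) - 1

-- ===== PRECONDITION & SPEC =====
def Spec_transform_to_db (raw_value : Int) (out : Int) : Prop := out = transform_to_db_alt raw_value
instance (raw_value : Int) (out : Int) : Decidable (Spec_transform_to_db raw_value out) := by unfold Spec_transform_to_db; infer_instance

-- ===== CLAIM (what is proved, stated in full; the proofs are below) =====
def Claim_equal_transform_to_db : Prop := ∀ (raw_value : Int), Dom_transform_to_db raw_value → Spec_transform_to_db raw_value (transform_to_db raw_value)

-- ===== LEMMAS AND PROOFS =====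
theorem transformationList_length : transformationList.length = 57 := by rfl

theorem transformationList_sorted : List.Pairwise (· ≤ ·) transformationList := by decide

theorem transformationList_mono (i j : Nat) (hij : i ≤ j) (hj : j < 57) :
    transformationList[i]'(by rw [transformationList_length]; omega) ≤
      transformationList[j]'(by rw [transformationList_length]; exact hj) := by
  exact List.Pairwise.rel_get_of_le transformationList_sorted
    (a := ⟨i, by rw [transformationList_length]; omega⟩)
    (b := ⟨j, by rw [transformationList_length]; exact hj⟩) hij

-- A's enumerate loop returns 40 + (first index with raw < val) - 1, or -1 when none exists
theorem aLoop_eq (raw : Int) (idx : Nat) (l : List Int) :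
    aLoop raw idx l =
      if l.findIdx (fun v => decide (raw < v)) < l.length
      then 40 + (((idx + l.findIdx (fun v => decide (raw < v)) : Nat) : Int)) - 1
      else -1 := by
  induction l generalizing idx with
  | nil => simp [aLoop]
  | cons v rest ih =>
    simp only [aLoop, List.findIdx_cons, List.length_cons]
    by_cases h : raw < v
    · simp [h]
    · rw [if_neg h, ih (idx + 1)]
      simp only [decide_eq_false h, cond_false]
      split_ifs <;> push_cast <;> omega

-- B's binary-search loop computes the same first index, given the table is sorted
theorem bsr_eq (raw : Int) (fuel lo hi : Nat)
    (hhi : hi ≤ 57) (hfuel : hi - lo ≤ fuel)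
    (hlo : lo ≤ transformationList.findIdx (fun v => decide (raw < v)))
    (hF : transformationList.findIdx (fun v => decide (raw < v)) ≤ hi) :
    bsr raw fuel lo hi = transformationList.findIdx (fun v => decide (raw < v)) := by
  induction fuel generalizing lo hi with
  | zero => simp only [bsr]; omega
  | succ n ih =>
    simp only [bsr]
    by_cases hlh : lo < hi
    · rw [if_pos hlh]
      have hmid57 : (lo + hi) / 2 < 57 := by omega
      have hmidlen : (lo + hi) / 2 < transformationList.length := by
        rw [transformationList_length]; exact hmid57
      rw [List.getD_eq_getElem _ _ hmidlen]
      by_cases hc : raw < transformationList[(lo + hi) / 2]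
      · rw [if_pos hc]
        have hFmid : transformationList.findIdx (fun v => decide (raw < v)) ≤ (lo + hi) / 2 := by
          by_contra hgt
          have := List.not_of_lt_findIdx (p := fun v => decide (raw < v))
            (xs := transformationList) (i := (lo + hi) / 2) (by omega)
          simp only [decide_eq_false_iff_not] at this
          exact this hc
        exact ih lo ((lo + hi) / 2) (by omega) (by omega) hlo hFmid
      · rw [if_neg hc]
        have hFmid : (lo + hi) / 2 + 1 ≤ transformationList.findIdx (fun v => decide (raw < v)) := by
          by_contra hle
          have hFlt : transformationList.findIdx (fun v => decide (raw < v)) < transformationList.length := by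
            rw [transformationList_length]; omega
          have hp := List.findIdx_getElem (p := fun v => decide (raw < v))
            (xs := transformationList) (w := hFlt)
          simp only [decide_eq_true_eq] at hp
          have hmono := transformationList_mono
            (transformationList.findIdx (fun v => decide (raw < v))) ((lo + hi) / 2)
            (by omega) hmid57
          exact hc (lt_of_lt_of_le hp hmono)
        exact ih ((lo + hi) / 2 + 1) hi hhi (by omega) hFmid hF
    · rw [if_neg hlh]; omega

theorem transform_to_db_eq_alt (raw_value : Int) :
    transform_to_db raw_value = transform_to_db_alt raw_value := by
  have h0 : (PySem.List.pyGet? transformationList 0).getD 0 = 28000 := by rfl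
  have hlast : (PySem.List.pyGet? transformationList (-1)).getD 0 = 3900000 := by rfl
  unfold transform_to_db transform_to_db_alt
  rw [h0, hlast]
  by_cases hlow : raw_value < 28000
  · simp [hlow]
  · rw [if_neg hlow, if_neg hlow]
    by_cases hhigh : raw_value > 3900000
    · simp [hhigh]
    · rw [if_neg hhigh, if_neg hhigh]
      have hFle : transformationList.findIdx (fun v => decide (raw_value < v)) ≤ 57 := by
        have := List.findIdx_le_length (p := fun v => decide (raw_value < v))
          (xs := transformationList)
        rwa [transformationList_length] at this
      rw [aLoop_eq, transformationList_length,
        bsr_eq raw_value 57 0 57 (le_refl 57) (by omega) (Nat.zero_le _) hFle]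
      dsimp only
      split_ifs <;> omega

-- ===== VERDICT (by name: the statement is the Claim_ definition above) =====
theorem transform_to_db_spec : Claim_equal_transform_to_db := by
  intro raw_value _
  unfold Spec_transform_to_db
  exact transform_to_db_eq_alt raw_value
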